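-- pv_equiv track=rewrite | github.com/Arun-V-S/TIPE | usuelles.py | tupleAdd
-- ===== SOURCE A (Python) =====
-- def tupleAdd(a, b):
--     if len(a) >= len(b):
--         L = []
--         for i in range(len(b)):
--             L.append(a[i] + b[i])
--         for i in range(len(b), len(a)):
--             L.append(a[i])
--     else:
--         L = []
--         for i in range(len(a)):
--             L.append(a[i] + b[i])
--         for i in range(len(a), len(b)):
--             L.append(b[i])
--     return tuple(L)
-- ===== SOURCE B (Python) =====
-- def tupleAdd(a, b):
--     n, m = len(a), len(b)
--     return tuple((a[i] if i < n else 0) + (b[i] if i < m else 0)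
--                  for i in range(max(n, m)))
-- ===== Notes on version B (the rewrite author's own statement) =====
-- stated objective: alternative
-- what changed: A branches on which tuple is longer and runs two staged loops (sums then verbatim tail copy); B removes the branch and tail copy entirely, computing every output position uniformly in one pass over range(max(n,m)) by padding missing positions with 0.
import Mathlib
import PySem

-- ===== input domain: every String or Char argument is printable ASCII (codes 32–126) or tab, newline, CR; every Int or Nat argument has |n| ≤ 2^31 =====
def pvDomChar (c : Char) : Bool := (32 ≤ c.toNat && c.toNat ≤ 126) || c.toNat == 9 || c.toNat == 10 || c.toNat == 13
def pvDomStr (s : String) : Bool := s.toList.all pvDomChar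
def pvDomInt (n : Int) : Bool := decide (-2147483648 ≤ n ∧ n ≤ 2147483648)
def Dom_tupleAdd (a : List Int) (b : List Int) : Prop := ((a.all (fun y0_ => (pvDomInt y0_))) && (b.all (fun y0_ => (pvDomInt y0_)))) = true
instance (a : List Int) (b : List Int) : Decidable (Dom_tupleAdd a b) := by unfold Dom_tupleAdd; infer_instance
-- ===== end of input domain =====

-- B drops A's length branch and staged loops: one uniform pass over range(max) with missing positions padded by 0 (alternative; exact on the Int domain).

-- ===== PORT A =====
def tupleAdd (a : List Int) (b : List Int) : List Int :=
  if a.length ≥ b.length then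
    let L : List Int := (PySem.List.pyRange 0 (b.length : Int) 1).foldl
      (fun L i => L ++ [PySem.List.pyGetD a i 0 + PySem.List.pyGetD b i 0]) []
    (PySem.List.pyRange (b.length : Int) (a.length : Int) 1).foldl
      (fun L i => L ++ [PySem.List.pyGetD a i 0]) L
  else
    let L : List Int := (PySem.List.pyRange 0 (a.length : Int) 1).foldl
      (fun L i => L ++ [PySem.List.pyGetD a i 0 + PySem.List.pyGetD b i 0]) []
    (PySem.List.pyRange (a.length : Int) (b.length : Int) 1).foldl
      (fun L i => L ++ [PySem.List.pyGetD b i 0]) L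

-- ===== PORT B =====
def tupleAdd_alt (a : List Int) (b : List Int) : List Int :=
  let n := a.length
  let m := b.length
  (PySem.List.pyRange 0 ((max n m : Nat) : Int) 1).map
    (fun i => (if i < (n : Int) then PySem.List.pyGetD a i 0 else 0)
            + (if i < (m : Int) then PySem.List.pyGetD b i 0 else 0))

-- ===== PRECONDITION & SPEC =====
def Spec_tupleAdd (a : List Int) (b : List Int) (out : List Int) : Prop := out = tupleAdd_alt a b
instance (a : List Int) (b : List Int) (out : List Int) : Decidable (Spec_tupleAdd a b out) := by unfold Spec_tupleAdd; infer_instance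

-- ===== CLAIM =====
def Claim_equal_tupleAdd : Prop := ∀ (a : List Int) (b : List Int), Dom_tupleAdd a b → Spec_tupleAdd a b (tupleAdd a b)

-- ===== LEMMAS AND PROOFS =====

-- the overlapping-sum loop over index range [0, min len) equals the zip pass
theorem pv_map_range_zip (a b : List Int) (h : b.length ≤ a.length) :
    (PySem.List.pyRange 0 (b.length : Int) 1).map
      (fun i => PySem.List.pyGetD a i 0 + PySem.List.pyGetD b i 0)
    = (a.zip b).map (fun p => p.1 + p.2) := by
  apply List.ext_getElem
  · simp [PySem.List.length_pyRange_one, List.length_zip]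
    omega
  · intro n h1 h2
    have hn : n < b.length := by
      simpa [PySem.List.length_pyRange_one] using h1
    have hna : n < a.length := Nat.lt_of_lt_of_le hn h
    simp [PySem.List.getElem_pyRange_one]
    simp [hn, hna]

theorem pv_tail_loop (a : List Int) (k : Nat) :
    (PySem.List.pyRange (k : Int) (a.length : Int) 1).map (fun i => PySem.List.pyGetD a i 0)
    = a.drop k := by
  have := PySem.List.map_pyGetD_pyRange a 0 (a := (k : Int)) (by positivity)
  simpa using this

-- characterisation of A as zip-sums followed by the longer list's tail
theorem pv_A_char_ge (a b : List Int) (h : b.length ≤ a.length) :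
    tupleAdd a b = (a.zip b).map (fun p => p.1 + p.2) ++ a.drop b.length := by
  unfold tupleAdd
  simp only [ge_iff_le, h, if_pos]
  rw [PySem.List.foldl_append_singleton_eq_map, PySem.List.foldl_append_singleton_eq_map]
  rw [List.nil_append, pv_map_range_zip a b h, pv_tail_loop]

theorem pv_A_char_lt (a b : List Int) (h : a.length < b.length) :
    tupleAdd a b = (a.zip b).map (fun p => p.1 + p.2) ++ b.drop a.length := by
  unfold tupleAdd
  simp only [ge_iff_le, not_le.mpr h, if_false]
  rw [PySem.List.foldl_append_singleton_eq_map, PySem.List.foldl_append_singleton_eq_map]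
  rw [List.nil_append, pv_tail_loop]
  have hz : a.zip b = (b.zip a).map (fun p => (p.2, p.1)) := by
    rw [← List.zip_swap]; rfl
  rw [show (fun i => PySem.List.pyGetD a i 0 + PySem.List.pyGetD b i 0)
        = (fun i => PySem.List.pyGetD b i 0 + PySem.List.pyGetD a i 0) from by
        funext i; ring]
  rw [pv_map_range_zip b a h.le, hz]
  simp [List.map_map, Function.comp]
  intro x y _; ring

-- characterisation of B: the padded uniform pass equals zip-sums plus the longer tail
theorem pv_B_char (a b : List Int) :
    tupleAdd_alt a b = (a.zip b).map (fun p => p.1 + p.2)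
      ++ (if b.length ≤ a.length then a.drop b.length else b.drop a.length) := by
  unfold tupleAdd_alt
  apply List.ext_getElem
  · simp only [List.length_map, PySem.List.length_pyRange_one, List.length_append, List.length_zip]
    split_ifs <;> simp <;> omega
  · intro n h1 h2
    have hn : n < max a.length b.length := by
      simpa [PySem.List.length_pyRange_one] using h1
    simp only [List.getElem_map, PySem.List.getElem_pyRange_one, zero_add]
    by_cases hmin : n < min a.length b.length
    · have hna : n < a.length := by omega
      have hnb : n < b.length := by omega
      rw [List.getElem_append_left (by simp [List.length_zip]; omega)]
      simp [hna, hnb]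
    · rw [List.getElem_append_right (by simp [List.length_zip]; omega)]
      by_cases hc : b.length ≤ a.length
      · have hna : n < a.length := by omega
        have hnb : ¬ ((n : Int) < (b.length : Int)) := by omega
        simp [hc, hna, hnb, List.length_zip]
        congr 1
        omega
      · have hnb : n < b.length := by omega
        have hna : ¬ ((n : Int) < (a.length : Int)) := by omega
        simp [hc, hna, hnb, List.length_zip]
        congr 1
        omega

-- ===== VERDICT =====
theorem tupleAdd_spec : Claim_equal_tupleAdd := by
  intro a b _
  unfold Spec_tupleAdd
  rw [pv_B_char]
  by_cases h : b.length ≤ a.length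
  · rw [if_pos h, pv_A_char_ge a b h]
  · rw [if_neg h, pv_A_char_lt a b (not_le.mp h)]
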